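-- pv_equiv track=rewrite | github.com/EdwardZehuaZhang/3d-printing-monorepo | rhino8-internal-wire/Libraries/wire_router/core.py | _orthogonal_offsets
-- ===== SOURCE A (Python) =====
-- from typing import Dict, Iterable, Iterator, List, Optional, Sequence, Set, Tuple
--
-- GridIndex = Tuple[int, int, int]
--
-- def _nonzero_axis(offset: GridIndex) -> int:
--     for axis, value in enumerate(offset):
--         if value != 0:
--             return axis
--     raise ValueError("Offset has no non-zero axis.")
--
-- def _orthogonal_offsets(step_offset: GridIndex) -> List[GridIndex]:
--     axis = _nonzero_axis(step_offset)
--     offsets: List[GridIndex] = []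
--     for orthogonal_axis in range(3):
--         if orthogonal_axis == axis:
--             continue
--         positive = [0, 0, 0]
--         positive[orthogonal_axis] = 1
--         offsets.append((positive[0], positive[1], positive[2]))
--         offsets.append((-positive[0], -positive[1], -positive[2]))
--     return offsets
-- ===== SOURCE B (Python) =====
-- _ORTHO_X = [(0, 1, 0), (0, -1, 0), (0, 0, 1), (0, 0, -1)]
-- _ORTHO_Y = [(1, 0, 0), (-1, 0, 0), (0, 0, 1), (0, 0, -1)]
-- _ORTHO_Z = [(1, 0, 0), (-1, 0, 0), (0, 1, 0), (0, -1, 0)]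
--
-- def _orthogonal_offsets(step_offset):
--     x, y, z = step_offset
--     if x:
--         return list(_ORTHO_X)
--     if y:
--         return list(_ORTHO_Y)
--     if z:
--         return list(_ORTHO_Z)
--     raise ValueError("Offset has no non-zero axis.")
-- ===== Notes on version B (the rewrite author's own statement) =====
-- stated objective: simpler
-- what changed: B has no loop, no axis index and no vector construction: it is a direct three-way case on the first nonzero component, each case returning a precomputed constant list of the four complete answers.
import Mathlib
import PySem

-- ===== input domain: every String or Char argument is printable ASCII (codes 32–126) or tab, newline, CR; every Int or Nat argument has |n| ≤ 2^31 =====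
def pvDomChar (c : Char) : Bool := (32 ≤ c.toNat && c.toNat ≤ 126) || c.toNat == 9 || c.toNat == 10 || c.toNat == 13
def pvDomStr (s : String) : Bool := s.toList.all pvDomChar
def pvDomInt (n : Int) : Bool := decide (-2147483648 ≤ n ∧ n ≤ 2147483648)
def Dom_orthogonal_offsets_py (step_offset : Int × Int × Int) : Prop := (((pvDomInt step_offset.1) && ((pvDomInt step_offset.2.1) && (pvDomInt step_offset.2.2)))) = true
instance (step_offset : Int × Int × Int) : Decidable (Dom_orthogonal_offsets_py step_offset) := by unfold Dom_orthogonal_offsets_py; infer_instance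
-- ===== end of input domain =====

-- B replaces A's per-axis build-and-negate loop by a direct three-way case returning precomputed complete answer lists (objective: simpler). Pre_ excludes the all-zero offset, on which A raises ValueError (B raises too).


-- ===== PORT A =====
def nonzero_axis_py (offset : Int × Int × Int) : Option Int :=
  -- loop 'for axis, value in enumerate(offset): if value != 0: return axis'
  -- unrolled over the 3-tuple; none = the ValueError branch
  if offset.1 ≠ 0 then some 0
  else if offset.2.1 ≠ 0 then some 1
  else if offset.2.2 ≠ 0 then some 2
  else none

-- Port of A: for each orthogonal_axis in range(3), skip the nonzero axis, build
-- the coordinate list 'positive', append it and its negation.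
def orthogonal_offsets_py (step_offset : Int × Int × Int) : List (Int × Int × Int) :=
  match nonzero_axis_py step_offset with
  | none => []   -- ValueError: excluded by Pre_
  | some axis =>
    (List.range 3).foldl (fun offsets (orthogonal_axis : Nat) =>
      if (orthogonal_axis : Int) = axis then offsets
      else
        let positive : List Int := ([0, 0, 0] : List Int).set orthogonal_axis 1
        let p := (positive.getD 0 0, positive.getD 1 0, positive.getD 2 0)
        offsets ++ [p] ++ [(-p.1, -p.2.1, -p.2.2)]) []

-- ===== PORT B =====
def ortho_x_table : List (Int × Int × Int) := [(0, 1, 0), (0, -1, 0), (0, 0, 1), (0, 0, -1)]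
def ortho_y_table : List (Int × Int × Int) := [(1, 0, 0), (-1, 0, 0), (0, 0, 1), (0, 0, -1)]
def ortho_z_table : List (Int × Int × Int) := [(1, 0, 0), (-1, 0, 0), (0, 1, 0), (0, -1, 0)]

-- Port of B: three-way truthiness case, each returning its precomputed constant list.
def orthogonal_offsets_py_alt (step_offset : Int × Int × Int) : List (Int × Int × Int) :=
  if step_offset.1 ≠ 0 then ortho_x_table
  else if step_offset.2.1 ≠ 0 then ortho_y_table
  else if step_offset.2.2 ≠ 0 then ortho_z_table
  else []   -- ValueError: excluded by Pre_

-- ===== PRECONDITION & SPEC =====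
-- Pre_ excludes only the all-zero offset, on which A raises ValueError (and B does too).
def Pre_orthogonal_offsets_py (step_offset : Int × Int × Int) : Prop :=
  ¬ (step_offset.1 = 0 ∧ step_offset.2.1 = 0 ∧ step_offset.2.2 = 0)
instance (step_offset : Int × Int × Int) : Decidable (Pre_orthogonal_offsets_py step_offset) := by unfold Pre_orthogonal_offsets_py; infer_instance
def pvWitness_orthogonal_offsets_py : (Int × Int × Int) := (1, 0, 0)
def Spec_orthogonal_offsets_py (step_offset : Int × Int × Int) (out : List (Int × Int × Int)) : Prop := out = orthogonal_offsets_py_alt step_offset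
instance (step_offset : Int × Int × Int) (out : List (Int × Int × Int)) : Decidable (Spec_orthogonal_offsets_py step_offset out) := by unfold Spec_orthogonal_offsets_py; infer_instance

-- ===== CLAIM (what is proved, stated in full; the proofs are below) =====
def Claim_equal_orthogonal_offsets_py : Prop := ∀ (step_offset : Int × Int × Int), Dom_orthogonal_offsets_py step_offset → Pre_orthogonal_offsets_py step_offset → Spec_orthogonal_offsets_py step_offset (orthogonal_offsets_py step_offset)

-- ===== LEMMAS AND PROOFS =====

-- ===== VERDICT (by name: the statement is the Claim_ definition above) =====
theorem orthogonal_offsets_py_spec : Claim_equal_orthogonal_offsets_py := by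
  intro ⟨x, y, z⟩ _ hpre
  unfold Spec_orthogonal_offsets_py orthogonal_offsets_py orthogonal_offsets_py_alt nonzero_axis_py
  by_cases hx : x = 0 <;> by_cases hy : y = 0 <;> by_cases hz : z = 0 <;>
    simp_all [Pre_orthogonal_offsets_py, List.range_succ,
      ortho_x_table, ortho_y_table, ortho_z_table]
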